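-- pv_equiv track=rewrite | github.com/ayeshamaqsood8100-cmd/Exam-Monitor | backend/services/analysis/providers/base.py | _looks_like_context_too_large
-- ===== SOURCE A (Python) =====
-- def _looks_like_context_too_large(message: str) -> bool:
--     lower = message.lower()
--     markers = (
--         "context length",
--         "maximum context",
--         "too many tokens",
--         "context window",
--         "input is too long",
--         "request too large",
--     )
--     return any(marker in lower for marker in markers)
-- ===== SOURCE B (Python) =====
-- _MARKERS = (
--     "context length",
--     "maximum context",
--     "too many tokens",
--     "context window",
--     "input is too long",
--     "request too large",
-- )
--
--
-- def _looks_like_context_too_large(message: str) -> bool: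
--     # single left-to-right pass: at each position test whether any marker starts there
--     lowered = message.lower()
--     i = 0
--     n = len(lowered)
--     while i < n:
--         for marker in _MARKERS:
--             if lowered.startswith(marker, i):
--                 return True
--         i += 1
--     return False
-- ===== Notes on version B (the rewrite author's own statement) =====
-- stated objective: alternative
-- what changed: Replaces six independent whole-string substring scans (one per marker) with a single left-to-right pass over the lowered string that tests all six markers as prefixes at each position.
import Mathlib
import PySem

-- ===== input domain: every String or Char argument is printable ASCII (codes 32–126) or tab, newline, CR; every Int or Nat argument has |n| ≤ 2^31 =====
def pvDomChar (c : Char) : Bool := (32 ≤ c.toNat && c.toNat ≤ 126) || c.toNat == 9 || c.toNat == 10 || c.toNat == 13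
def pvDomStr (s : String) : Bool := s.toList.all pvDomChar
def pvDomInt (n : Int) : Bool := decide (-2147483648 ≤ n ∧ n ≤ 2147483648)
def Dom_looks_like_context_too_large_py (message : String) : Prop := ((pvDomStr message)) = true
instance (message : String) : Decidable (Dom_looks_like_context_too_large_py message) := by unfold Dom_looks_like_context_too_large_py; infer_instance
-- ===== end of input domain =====

-- B replaces A's six independent whole-string substring scans with one left-to-right pass
-- testing all six markers as prefixes at each position (objective: alternative).

-- ===== PORT A =====
def pvMarkers : List String :=
  ["context length", "maximum context", "too many tokens",
   "context window", "input is too long", "request too large"]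

def looks_like_context_too_large_py (message : String) : Bool :=
  let lower := PySem.Str.lower message
  pvMarkers.any (fun marker => PySem.Str.isIn marker lower)

-- ===== PORT B =====
def pvMarkersB : List (List Char) :=
  ["context length".toList, "maximum context".toList, "too many tokens".toList,
   "context window".toList, "input is too long".toList, "request too large".toList]

-- the loop 'for i in range(len(lower)): for marker in markers: if lower.startswith(marker, i)'
def pvScan : List Char → Bool
  | [] => false
  | c :: rest =>
      if pvMarkersB.any (fun marker => marker.isPrefixOf (c :: rest)) then true
      else pvScan rest

def looks_like_context_too_large_py_alt (message : String) : Bool :=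
  pvScan (PySem.Str.lower message).toList

-- ===== PRECONDITION & SPEC =====
def Spec_looks_like_context_too_large_py (message : String) (out : Bool) : Prop := out = looks_like_context_too_large_py_alt message
instance (message : String) (out : Bool) : Decidable (Spec_looks_like_context_too_large_py message out) := by unfold Spec_looks_like_context_too_large_py; infer_instance

-- ===== CLAIM (what is proved, stated in full; the proofs are below) =====
def Claim_equal_looks_like_context_too_large_py : Prop := ∀ (message : String), Dom_looks_like_context_too_large_py message → Spec_looks_like_context_too_large_py message (looks_like_context_too_large_py message)

-- ===== LEMMAS AND PROOFS =====

-- the scan finds a match iff some (nonempty) marker is an infix of the scanned string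
lemma pvScan_iff (cs : List Char) (hne : ∀ m ∈ pvMarkersB, m ≠ []) :
    pvScan cs = true ↔ ∃ m ∈ pvMarkersB, m <:+: cs := by
  induction cs with
  | nil =>
      simp only [pvScan, List.infix_nil]
      constructor
      · intro h; exact absurd h (by simp)
      · rintro ⟨m, hm, rfl⟩; exact absurd rfl (hne _ hm)
  | cons c rest ih =>
      simp only [pvScan]
      split_ifs with h
      · simp only [List.any_eq_true] at h
        obtain ⟨m, hm, hp⟩ := h
        exact iff_of_true rfl ⟨m, hm, (List.isPrefixOf_iff_prefix.mp hp).isInfix⟩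
      · rw [ih]
        constructor
        · rintro ⟨m, hm, hi⟩; exact ⟨m, hm, hi.trans (List.infix_cons_iff.mpr (Or.inr (by rfl)))⟩
        · rintro ⟨m, hm, hi⟩
          rcases List.infix_cons_iff.mp hi with hpre | hinf
          · exact absurd (by simp only [List.any_eq_true]; exact ⟨m, hm, List.isPrefixOf_iff_prefix.mpr hpre⟩) h
          · exact ⟨m, hm, hinf⟩

lemma pvMarkersB_eq : pvMarkersB = pvMarkers.map String.toList := by rfl

-- ===== VERDICT (by name: the statement is the Claim_ definition above) =====
theorem looks_like_context_too_large_py_spec : Claim_equal_looks_like_context_too_large_py := by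
  intro message _
  unfold Spec_looks_like_context_too_large_py looks_like_context_too_large_py looks_like_context_too_large_py_alt
  rw [Bool.eq_iff_iff]
  rw [pvScan_iff _ (by decide)]
  simp only [List.any_eq_true, PySem.Str.isIn_iff_infix]
  rw [pvMarkersB_eq]
  constructor
  · rintro ⟨m, hm, hi⟩
    exact ⟨m.toList, List.mem_map_of_mem hm, hi⟩
  · rintro ⟨m, hm, hi⟩
    obtain ⟨s, hs, rfl⟩ := List.mem_map.mp hm
    exact ⟨s, hs, hi⟩
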